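-- pv_equiv track=rewrite | github.com/gbrosman27/code_wars | 8kyu/bartender.py | get_drink_by_profession
-- ===== SOURCE A (Python) =====
-- def get_drink_by_profession(param):
--     input = {"Jabroni": "Patron Tequila",
--             "School Counselor": "Anything with Alcohol",
--             "Programmer": "Hipster Craft Beer",
--             "Bike Gang Member": "Moonshine",
--             "Politician": "Your tax dollars",
--             "Rapper": "Cristal"}
--
--
--     lower_param = param.lower()
--     lower_input = {k.lower(): v for k, v in input.items()}
--     if lower_param in lower_input:
--         return lower_input.get(lower_param)
--     else:
--         return "Beer"
-- ===== SOURCE B (Python) =====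
-- def get_drink_by_profession(param):
--     # static table sorted by (already lowercased) key; classic binary search
--     table = [("bike gang member", "Moonshine"),
--              ("jabroni", "Patron Tequila"),
--              ("politician", "Your tax dollars"),
--              ("programmer", "Hipster Craft Beer"),
--              ("rapper", "Cristal"),
--              ("school counselor", "Anything with Alcohol")]
--     target = param.lower()
--     lo, hi = 0, len(table)
--     while lo < hi:
--         mid = (lo + hi) // 2
--         if table[mid][0] < target:
--             lo = mid + 1
--         else:
--             hi = mid
--     if lo < len(table) and table[lo][0] == target:
--         return table[lo][1]
--     return "Beer"
-- ===== Notes on version B (the rewrite author's own statement) =====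
-- stated objective: alternative
-- what changed: A rebuilds a lowercased dict each call and resolves the profession by membership test plus dict lookup; B instead keeps a statically sorted lowercased (key, value) table and locates param.lower() with a hand-written lower-bound binary search, returning Beer on a miss.
import Mathlib
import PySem

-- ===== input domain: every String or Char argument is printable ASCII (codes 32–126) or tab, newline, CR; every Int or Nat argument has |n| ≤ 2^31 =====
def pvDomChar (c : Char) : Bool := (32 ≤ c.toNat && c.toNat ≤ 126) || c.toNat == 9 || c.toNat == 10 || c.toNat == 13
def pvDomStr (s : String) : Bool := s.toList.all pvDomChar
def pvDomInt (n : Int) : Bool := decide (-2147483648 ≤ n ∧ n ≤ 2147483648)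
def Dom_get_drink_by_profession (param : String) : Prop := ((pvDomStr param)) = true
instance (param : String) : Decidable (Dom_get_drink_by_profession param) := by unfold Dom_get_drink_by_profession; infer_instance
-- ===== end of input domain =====

-- B: instead of building a lowercased dict and doing a membership test + lookup, B keeps a
-- statically sorted lowercased table and binary-searches it (objective: alternative algorithm).
-- ===== PORT A =====
def pvInput_get_drink_by_profession : PySem.Dict String String :=
  PySem.Dict.ofList [("Jabroni", "Patron Tequila"),
    ("School Counselor", "Anything with Alcohol"),
    ("Programmer", "Hipster Craft Beer"),
    ("Bike Gang Member", "Moonshine"),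
    ("Politician", "Your tax dollars"),
    ("Rapper", "Cristal")]

def get_drink_by_profession (param : String) : String :=
  let input := pvInput_get_drink_by_profession
  let lower_param := PySem.Str.lower param
  let lower_input : PySem.Dict String String :=
    PySem.Dict.ofList (input.items.map (fun kv => (PySem.Str.lower kv.1, kv.2)))
  if lower_input.contains lower_param then
    -- lower_input.get(lower_param): under the contains-guard this is always some; .getD "Beer" only unwraps it
    (lower_input.get? lower_param).getD "Beer"
  else
    "Beer"

-- ===== PORT B =====
def pvTable_get_drink_by_profession : List (String × String) :=
  [("bike gang member", "Moonshine"),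
   ("jabroni", "Patron Tequila"),
   ("politician", "Your tax dollars"),
   ("programmer", "Hipster Craft Beer"),
   ("rapper", "Cristal"),
   ("school counselor", "Anything with Alcohol")]

-- Source B's while loop; structural recursion on a fuel that starts at table.length ≥ hi - lo,
-- and hi - lo shrinks by at least 1 each iteration, so the fuel never runs out; table[mid]
-- is always in range when lo < hi ≤ length, so getD is exact there
def pvBsearch_get_drink_by_profession (table : List (String × String)) (target : String) :
    Nat → Nat → Nat → Nat
  | 0, lo, _ => lo
  | fuel + 1, lo, hi =>
    if lo < hi then
      -- table[mid][0] < target: Python's string '<' is codepoint-lexicographic, exactly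
      -- List.lt on the characters, so the comparison is taken on .toList
      if (table.getD ((lo + hi) / 2) ("", "")).1.toList < target.toList then
        pvBsearch_get_drink_by_profession table target fuel ((lo + hi) / 2 + 1) hi
      else
        pvBsearch_get_drink_by_profession table target fuel lo ((lo + hi) / 2)
    else lo

def get_drink_by_profession_alt (param : String) : String :=
  let table := pvTable_get_drink_by_profession
  let target := PySem.Str.lower param
  let lo := pvBsearch_get_drink_by_profession table target table.length 0 table.length
  if lo < table.length ∧ (table.getD lo ("", "")).1 = target then
    (table.getD lo ("", "")).2
  else "Beer"

-- ===== PRECONDITION & SPEC =====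
def Spec_get_drink_by_profession (param : String) (out : String) : Prop := out = get_drink_by_profession_alt param
instance (param : String) (out : String) : Decidable (Spec_get_drink_by_profession param out) := by unfold Spec_get_drink_by_profession; infer_instance

-- ===== CLAIM (what is proved, stated in full; the proofs are below) =====
def Claim_equal_get_drink_by_profession : Prop := ∀ (param : String), Dom_get_drink_by_profession param → Spec_get_drink_by_profession param (get_drink_by_profession param)

-- ===== LEMMAS AND PROOFS =====

-- ===== VERDICT (by name: the statement is the Claim_ definition above) =====
set_option maxHeartbeats 1000000 in
theorem get_drink_by_profession_spec : Claim_equal_get_drink_by_profession := by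
  intro param _
  unfold Spec_get_drink_by_profession get_drink_by_profession get_drink_by_profession_alt
  dsimp only []
  generalize PySem.Str.lower param = p
  by_cases h0 : p = "bike gang member"; · subst h0; decide
  by_cases h1 : p = "jabroni"; · subst h1; decide
  by_cases h2 : p = "politician"; · subst h2; decide
  by_cases h3 : p = "programmer"; · subst h3; decide
  by_cases h4 : p = "rapper"; · subst h4; decide
  by_cases h5 : p = "school counselor"; · subst h5; decide
  -- p matches no key: both sides return "Beer"
  rw [show (PySem.Dict.ofList ((pvInput_get_drink_by_profession).items.map
        (fun kv => (PySem.Str.lower kv.1, kv.2)))) =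
      PySem.Dict.mk [("jabroni", "Patron Tequila"),
        ("school counselor", "Anything with Alcohol"),
        ("programmer", "Hipster Craft Beer"),
        ("bike gang member", "Moonshine"),
        ("politician", "Your tax dollars"),
        ("rapper", "Cristal")] from by decide]
  generalize pvBsearch_get_drink_by_profession pvTable_get_drink_by_profession p
      pvTable_get_drink_by_profession.length 0 pvTable_get_drink_by_profession.length = i
  have hA : (PySem.Dict.mk [("jabroni", "Patron Tequila"),
        ("school counselor", "Anything with Alcohol"),
        ("programmer", "Hipster Craft Beer"),
        ("bike gang member", "Moonshine"),
        ("politician", "Your tax dollars"),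
        ("rapper", "Cristal")]).contains p = false := by
    simp [PySem.Dict.contains_mk]
    refine ⟨?_, ?_, ?_, ?_, ?_, ?_⟩ <;> intro h <;> simp_all
  rw [if_neg (by simp [hA])]
  have hB : ¬ (i < pvTable_get_drink_by_profession.length ∧
      ((pvTable_get_drink_by_profession).getD i ("", "")).1 = p) := by
    rintro ⟨hlt, heq⟩
    have h6 : i < 6 := by simpa [pvTable_get_drink_by_profession] using hlt
    interval_cases i <;> simp_all [pvTable_get_drink_by_profession]
  rw [if_neg hB]
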